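-- pv_equiv track=rewrite | github.com/KonradSilenski/Apex-Services-Group-Assistant | sorCodeModel/learnLayer/evidence_core.py | _nearest_material
-- ===== SOURCE A (Python) =====
-- from typing import Any, Dict, Iterable, List, Optional, Set, Tuple
--
-- MATERIAL_ALIASES = {
--     # lead / roof parts
--     "flashing": {"flashing", "flashings", "abutment", "abutments", "step", "cover", "apron"},
--     "apron": {"apron", "aprons"},
--     "soaker": {"soaker", "soakers"},
--     "valley": {"valley", "valleys"},
--     "hip": {"hip", "hips"},
--     "ridge": {"ridge", "ridges"},
--     "verge": {"verge", "verges"},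
--
--     # rainwater goods
--     "gutter": {"gutter", "gutters", "guttering"},
--     "downpipe": {"downpipe", "downpipes", "rwp", "rainwater", "rain"},
--
--     # tiles
--     "tile": {"tile", "tiles"},
--     "slate": {"slate", "slates"},
--     "plain": {"plain"},
--     "concrete": {"concrete"},
--     "clay": {"clay"},
-- }
--
-- def _nearest_material(words: List[str], idx: int) -> Optional[str]:
--     best = None
--     best_dist = 9999
--     flat_aliases = []
--     for key, aliases in MATERIAL_ALIASES.items():
--         for a in aliases:
--             flat_aliases.append((key, a))
--     for j, w in enumerate(words):
--         for key, a in flat_aliases: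
--             if w == a:
--                 d = abs(j - idx)
--                 if d < best_dist:
--                     best_dist = d
--                     best = key
--     return best
-- ===== SOURCE B (Python) =====
-- from typing import List, Optional
-- from bisect import bisect_left
--
-- MATERIAL_ALIASES = {
--     "flashing": {"flashing", "flashings", "abutment", "abutments", "step", "cover", "apron"},
--     "apron": {"apron", "aprons"},
--     "soaker": {"soaker", "soakers"},
--     "valley": {"valley", "valleys"},
--     "hip": {"hip", "hips"},
--     "ridge": {"ridge", "ridges"},
--     "verge": {"verge", "verges"},
--     "gutter": {"gutter", "gutters", "guttering"},
--     "downpipe": {"downpipe", "downpipes", "rwp", "rainwater", "rain"},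
--     "tile": {"tile", "tiles"},
--     "slate": {"slate", "slates"},
--     "plain": {"plain"},
--     "concrete": {"concrete"},
--     "clay": {"clay"},
-- }
--
-- # alias -> canonical key; the first key (in declaration order) wins for
-- # an alias listed under several keys.
-- _ALIAS_TO_KEY = {}
-- for _key, _aliases in MATERIAL_ALIASES.items():
--     for _a in _aliases:
--         _ALIAS_TO_KEY.setdefault(_a, _key)
--
-- def _nearest_material(words: List[str], idx: int) -> Optional[str]:
--     # positions of material words, ascending by construction
--     cands = [(j, _ALIAS_TO_KEY[w]) for j, w in enumerate(words) if w in _ALIAS_TO_KEY]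
--     if not cands:
--         return None
--     pos = [j for j, _ in cands]
--     i = bisect_left(pos, idx)
--     # only the two candidates straddling idx can be nearest;
--     # on a tie the lower position wins
--     best = cands[i] if i < len(cands) else None
--     if i > 0:
--         lo = cands[i - 1]
--         if best is None or idx - lo[0] <= best[0] - idx:
--             best = lo
--     return best[1]
-- ===== Notes on version B (the rewrite author's own statement) =====
-- stated objective: faster
-- what changed: B precomputes an alias-to-key dictionary (first key wins, matching A's scan order), collects the matching (position, key) pairs in one pass, and picks the nearest match by bisecting the sorted positions and comparing only the two candidates straddling idx (tie toward the lower position), instead of A's nested scan of every word against the full flattened alias list with a running minimum.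
-- intended difference: On inputs that contain at least one material word but where every material word is 9999 or more positions from idx, A returns None because its running minimum starts at the sentinel distance 9999, while B returns the key of the nearest material word, which is the intended value for a nearest-match lookup. — e.g. on _nearest_material(["tile"], 10000): A returns none, B returns some "tile"
import Mathlib
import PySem

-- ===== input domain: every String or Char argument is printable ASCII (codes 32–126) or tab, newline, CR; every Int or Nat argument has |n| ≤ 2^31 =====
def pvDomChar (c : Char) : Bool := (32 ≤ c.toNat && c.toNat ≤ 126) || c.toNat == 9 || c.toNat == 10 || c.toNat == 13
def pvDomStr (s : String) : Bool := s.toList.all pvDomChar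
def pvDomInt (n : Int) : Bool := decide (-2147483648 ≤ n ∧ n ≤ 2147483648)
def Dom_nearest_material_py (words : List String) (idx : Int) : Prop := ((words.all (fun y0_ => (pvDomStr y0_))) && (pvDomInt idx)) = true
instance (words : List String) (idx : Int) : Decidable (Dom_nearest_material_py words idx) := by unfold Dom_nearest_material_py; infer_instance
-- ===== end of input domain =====

-- B replaces A's nested scan (every word against the full flattened alias list, with a
-- running minimum) by a precomputed alias→key table, one collection pass, and a bisect
-- over the sorted match positions; where every material word is ≥ 9999 positions from
-- idx, A's sentinel makes it return none while B returns the nearest key (see D_ below).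

-- ===== PORT A =====
-- MATERIAL_ALIASES, in source order (sets kept as lists; within one set, order
-- never affects the result since a word equals at most one alias of the set)
def MATERIAL_ALIASES_py : List (String × List String) :=
  [("flashing", ["flashing", "flashings", "abutment", "abutments", "step", "cover", "apron"]),
   ("apron", ["apron", "aprons"]),
   ("soaker", ["soaker", "soakers"]),
   ("valley", ["valley", "valleys"]),
   ("hip", ["hip", "hips"]),
   ("ridge", ["ridge", "ridges"]),
   ("verge", ["verge", "verges"]),
   ("gutter", ["gutter", "gutters", "guttering"]),
   ("downpipe", ["downpipe", "downpipes", "rwp", "rainwater", "rain"]),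
   ("tile", ["tile", "tiles"]),
   ("slate", ["slate", "slates"]),
   ("plain", ["plain"]),
   ("concrete", ["concrete"]),
   ("clay", ["clay"])]

-- flat_aliases = [(key, a) for key, aliases in MATERIAL_ALIASES.items() for a in aliases]
def flatAliases : List (String × String) :=
  MATERIAL_ALIASES_py.foldl (fun acc kv => kv.2.foldl (fun acc a => acc ++ [(kv.1, a)]) acc) []

def nearest_material_py (words : List String) (idx : Int) : Option String :=
  ((PySem.List.enumerate words).foldl (fun s jw =>
      flatAliases.foldl (fun s ka =>
        if jw.2 == ka.2 then
          let d := |jw.1 - idx|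
          if d < s.2 then (some ka.1, d) else s
        else s) s)
    ((none : Option String), (9999 : Int))).1

-- ===== PORT B =====
-- _ALIAS_TO_KEY built with setdefault: first key (in declaration order) wins
def aliasToKey : PySem.Dict String String :=
  MATERIAL_ALIASES_py.foldl (fun d kv => kv.2.foldl (fun d a => d.setdefault a kv.1) d) PySem.Dict.empty

def nearest_material_py_alt (words : List String) (idx : Int) : Option String :=
  let cands : List (Int × String) :=
    (PySem.List.enumerate words).filterMap (fun jw => (aliasToKey.get? jw.2).map (fun k => (jw.1, k)))
  if cands.isEmpty then none
  else
    let pos := cands.map (·.1)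
    let i := PySem.List.bisectLeft pos idx
    -- best = cands[i] if i < len(cands) else None
    let best0 : Option (Int × String) := if i < cands.length then some (cands.getD i ((0:Int), "")) else none
    -- if i > 0: lo = cands[i-1]; if best is None or idx - lo[0] <= best[0] - idx: best = lo
    let best1 : Option (Int × String) :=
      if 0 < i then
        let lo := cands.getD (i - 1) ((0:Int), "")
        if best0.isNone = true ∨ idx - lo.1 ≤ (best0.getD ((0:Int), "")).1 - idx then some lo else best0
      else best0
    -- here best is provably not None; getD only supplies an unused default
    some (best1.getD ((0:Int), "")).2

-- ===== PRECONDITION & SPEC =====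
-- a word is a material alias: membership in the alias table (used only by D_)
def isMaterialWord (w : String) : Bool := MATERIAL_ALIASES_py.any (fun kv => kv.2.contains w)

-- On inputs containing a material word where every material word is ≥ 9999 positions
-- from idx, A returns none (its running minimum starts at the sentinel 9999) while B
-- returns the nearest material key, the intended value for a nearest-match lookup.
def D_nearest_material_py (words : List String) (idx : Int) : Prop :=
  ((PySem.List.enumerate words).any (fun jw => isMaterialWord jw.2)) = true ∧
  ((PySem.List.enumerate words).all (fun jw =>
      !(isMaterialWord jw.2) || decide (9999 ≤ |jw.1 - idx|))) = true
instance (words : List String) (idx : Int) : Decidable (D_nearest_material_py words idx) := by unfold D_nearest_material_py; infer_instance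

def Spec_nearest_material_py (words : List String) (idx : Int) (out : Option String) : Prop := ¬ D_nearest_material_py words idx → out = nearest_material_py_alt words idx
instance (words : List String) (idx : Int) (out : Option String) : Decidable (Spec_nearest_material_py words idx out) := by unfold Spec_nearest_material_py; infer_instance

def pvDiffWitness_nearest_material_py : List String × Int := (["tile"], 10000)
def pvDiffWitnessOut_nearest_material_py : (Option String) × (Option String) := (none, some "tile")

-- ===== CLAIM (what is proved, stated in full; the proofs are below) =====
def Claim_unchanged_nearest_material_py : Prop := ∀ (words : List String) (idx : Int), Dom_nearest_material_py words idx → Spec_nearest_material_py words idx (nearest_material_py words idx)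
def Claim_changed_nearest_material_py : Prop := Dom_nearest_material_py (pvDiffWitness_nearest_material_py.1) (pvDiffWitness_nearest_material_py.2) ∧ D_nearest_material_py (pvDiffWitness_nearest_material_py.1) (pvDiffWitness_nearest_material_py.2) ∧ nearest_material_py (pvDiffWitness_nearest_material_py.1) (pvDiffWitness_nearest_material_py.2) = pvDiffWitnessOut_nearest_material_py.1 ∧ nearest_material_py_alt (pvDiffWitness_nearest_material_py.1) (pvDiffWitness_nearest_material_py.2) = pvDiffWitnessOut_nearest_material_py.2 ∧ pvDiffWitnessOut_nearest_material_py.1 ≠ pvDiffWitnessOut_nearest_material_py.2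
def Claim_exact_nearest_material_py : Prop := ∀ (words : List String) (idx : Int), Dom_nearest_material_py words idx → D_nearest_material_py words idx → nearest_material_py words idx ≠ nearest_material_py_alt words idx

-- ===== LEMMAS AND PROOFS =====

-- the running-min update A performs for one matching word
def minUpd (idx : Int) (s : Option String × Int) (c : Int × String) : Option String × Int :=
  if |c.1 - idx| < s.2 then (some c.2, |c.1 - idx|) else s

-- the candidate list B builds (proof-side name for the let in the alt port)
def candList (words : List String) : List (Int × String) :=
  (PySem.List.enumerate words).filterMap (fun jw => (aliasToKey.get? jw.2).map (fun k => (jw.1, k)))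

-- the straddle choice B makes (proof-side name for the lets in the alt port, inlined)
def straddleBest (cs : List (Int × String)) (idx : Int) (i : Nat) : Int × String :=
  ((if 0 < i then
      (if (if i < cs.length then some (cs.getD i ((0:Int), "")) else none).isNone = true
          ∨ idx - (cs.getD (i - 1) ((0:Int), "")).1
              ≤ ((if i < cs.length then some (cs.getD i ((0:Int), "")) else none).getD ((0:Int), "")).1 - idx
       then some (cs.getD (i - 1) ((0:Int), ""))
       else (if i < cs.length then some (cs.getD i ((0:Int), "")) else none))
    else (if i < cs.length then some (cs.getD i ((0:Int), "")) else none)).getD ((0:Int), ""))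

-- A's inner loop over any flat (key, alias) list = first-match lookup
lemma inner_fold (ps : List (String × String)) (w : String) (j idx : Int) (s : Option String × Int) :
    ps.foldl (fun s ka =>
        if w == ka.2 then
          let d := |j - idx|
          if d < s.2 then (some ka.1, d) else s
        else s) s
      = match ps.find? (fun ka => w == ka.2) with
        | none => s
        | some ka => if |j - idx| < s.2 then (some ka.1, |j - idx|) else s := by
  induction ps generalizing s with
  | nil => rfl
  | cons ka' t ih =>
    simp only [List.foldl_cons, List.find?_cons]
    by_cases h : (w == ka'.2)
    · simp only [h, if_pos]
      rw [ih]
      cases hf : t.find? (fun ka => w == ka.2) with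
      | none =>
        by_cases hd : |j - idx| < s.2 <;> simp [hd]
      | some ka2 =>
        by_cases hd : |j - idx| < s.2 <;> simp [hd]
    · have hb : (w == ka'.2) = false := by simpa using h
      simp only [hb, Bool.false_eq_true, if_false]
      exact ih s

-- first match in the flat list = lookup in the setdefault-built dict (generic invariant)
lemma find_flat_eq_get (w : String) :
    (flatAliases.find? (fun ka => w == ka.2)).map (·.1) = aliasToKey.get? w := by
  have step : ∀ (key a : String) (acc : List (String × String)) (d : PySem.Dict String String),
      (∀ w, (acc.find? (fun ka => w == ka.2)).map (·.1) = d.get? w) →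
      ∀ w, ((acc ++ [(key, a)]).find? (fun ka => w == ka.2)).map (·.1) = (d.setdefault a key).get? w := by
    intro key a acc d hrel w
    by_cases hw : w = a
    · subst hw
      rw [PySem.Dict.get?_setdefault_self]
      cases h : acc.find? (fun ka => w == ka.2) with
      | none =>
        have hget : d.get? w = none := by rw [← hrel w, h]; rfl
        rw [List.find?_append, h]
        simp [hget, List.find?]
      | some ka =>
        have hget : d.get? w = some ka.1 := by rw [← hrel w, h]; rfl
        rw [List.find?_append, h]
        simp [hget]
    · rw [PySem.Dict.get?_setdefault_of_ne d key hw, List.find?_append, ← hrel w]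
      have hb : (w == a) = false := by simpa using hw
      cases h : acc.find? (fun ka => w == ka.2) <;> simp [List.find?, hb]
  have inner : ∀ (as_ : List String) (key : String) (acc : List (String × String)) (d : PySem.Dict String String),
      (∀ w, (acc.find? (fun ka => w == ka.2)).map (·.1) = d.get? w) →
      ∀ w, ((as_.foldl (fun acc a => acc ++ [(key, a)]) acc).find? (fun ka => w == ka.2)).map (·.1)
          = (as_.foldl (fun d a => d.setdefault a key) d).get? w := by
    intro as_
    induction as_ with
    | nil => intro key acc d hrel w; exact hrel w
    | cons a t ih =>
      intro key acc d hrel w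
      exact ih key (acc ++ [(key, a)]) (d.setdefault a key) (step key a acc d hrel) w
  have outer : ∀ (al : List (String × List String)) (acc : List (String × String)) (d : PySem.Dict String String),
      (∀ w, (acc.find? (fun ka => w == ka.2)).map (·.1) = d.get? w) →
      ∀ w, ((al.foldl (fun acc kv => kv.2.foldl (fun acc a => acc ++ [(kv.1, a)]) acc) acc).find? (fun ka => w == ka.2)).map (·.1)
          = (al.foldl (fun d kv => kv.2.foldl (fun d a => d.setdefault a kv.1) d) d).get? w := by
    intro al
    induction al with
    | nil => intro acc d hrel w; exact hrel w
    | cons kv t ih =>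
      intro acc d hrel w
      exact ih _ _ (inner kv.2 kv.1 acc d hrel) w
  exact outer MATERIAL_ALIASES_py [] PySem.Dict.empty (by intro w; simp [PySem.Dict.get?, PySem.Dict.empty]) w

-- a fold that skips non-candidates is a fold over the filterMap
lemma foldl_opt_filterMap {α β σ : Type} (g : α → Option β) (f : σ → β → σ) :
    ∀ (l : List α) (init : σ),
      l.foldl (fun s x => (g x).elim s (fun y => f s y)) init
        = (l.filterMap g).foldl f init := by
  intro l
  induction l with
  | nil => intro init; rfl
  | cons x t ih =>
    intro init
    cases h : g x <;> simp [h, ih]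

-- A = running min over the candidate list
set_option maxRecDepth 8000 in
lemma a_eq_fold (words : List String) (idx : Int) :
    nearest_material_py words idx
      = ((candList words).foldl (minUpd idx) ((none : Option String), (9999 : Int))).1 := by
  unfold nearest_material_py candList
  have h1 : ∀ (s : Option String × Int) (jw : Int × String),
      flatAliases.foldl (fun s ka =>
        if jw.2 == ka.2 then
          let d := |jw.1 - idx|
          if d < s.2 then (some ka.1, d) else s
        else s) s
      = ((aliasToKey.get? jw.2).map (fun k => (jw.1, k))).elim s (fun c => minUpd idx s c) := by
    intro s jw
    rw [inner_fold]
    have h2 := find_flat_eq_get jw.2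
    cases hf : flatAliases.find? (fun ka => jw.2 == ka.2) with
    | none => rw [hf] at h2; rw [← h2]; rfl
    | some ka => rw [hf] at h2; rw [← h2]; rfl
  rw [show (fun (s : Option String × Int) (jw : Int × String) =>
        flatAliases.foldl (fun s ka =>
          if jw.2 == ka.2 then
            let d := |jw.1 - idx|
            if d < s.2 then (some ka.1, d) else s
          else s) s)
      = (fun s jw => ((aliasToKey.get? jw.2).map (fun k => (jw.1, k))).elim s (fun c => minUpd idx s c))
      from funext fun s => funext fun jw => h1 s jw]
  exact congrArg Prod.fst (foldl_opt_filterMap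
    (fun jw : Int × String => (aliasToKey.get? jw.2).map (fun k => (jw.1, k)))
    (minUpd idx) (PySem.List.enumerate words) ((none : Option String), (9999 : Int)))

-- no update when every remaining distance is at least the current best
lemma noupd_fold (idx : Int) : ∀ (cs : List (Int × String)) (s : Option String × Int),
    (∀ c ∈ cs, s.2 ≤ |c.1 - idx|) → cs.foldl (minUpd idx) s = s := by
  intro cs
  induction cs with
  | nil => intro s _; rfl
  | cons c t ih =>
    intro s h
    have hc := h c (by simp)
    simp only [List.foldl_cons, minUpd, if_neg (by omega : ¬ |c.1 - idx| < s.2)]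
    exact ih s (fun c' hc' => h c' (by simp [hc']))

-- strictly decreasing distances: only the last element matters
lemma dec_fold (idx : Int) : ∀ (cs : List (Int × String)) (s : Option String × Int)
    (_ : cs.Pairwise (fun a b => |b.1 - idx| < |a.1 - idx|)) (h : cs ≠ []),
    cs.foldl (minUpd idx) s = minUpd idx s (cs.getLast h) := by
  intro cs
  induction cs with
  | nil => intro s _ h; exact absurd rfl h
  | cons c t ih =>
    intro s hp h
    cases t with
    | nil => rfl
    | cons c' t' =>
      have hcast : (c :: c' :: t').getLast h = (c' :: t').getLast (by simp) := rfl
      rw [List.foldl_cons, ih (minUpd idx s c) (List.pairwise_cons.mp hp).2 (by simp), hcast]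
      have hL : |((c' :: t').getLast (by simp)).1 - idx| < |c.1 - idx| :=
        List.rel_of_pairwise_cons hp (List.getLast_mem _)
      by_cases h1 : |c.1 - idx| < s.2
      · have hc : minUpd idx s c = (some c.2, |c.1 - idx|) := by simp [minUpd, h1]
        rw [hc]
        show (if |((c' :: t').getLast (by simp)).1 - idx| < |c.1 - idx| then _ else _) = _
        rw [if_pos hL]
        show _ = (if |((c' :: t').getLast (by simp)).1 - idx| < s.2 then _ else _)
        rw [if_pos (by omega)]
      · have hc : minUpd idx s c = s := by simp [minUpd, h1]
        rw [hc]

-- positions in the candidate list are strictly increasing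
lemma cand_pairwise (words : List String) :
    (candList words).Pairwise (fun a b => a.1 < b.1) := by
  unfold candList
  rw [List.pairwise_filterMap]
  refine (PySem.List.pairwise_lt_enumerate words 0).imp_of_mem ?_
  intro a b _ _ hab x hx y hy
  cases hxo : aliasToKey.get? a.2 <;> rw [hxo] at hx <;> simp at hx
  cases hyo : aliasToKey.get? b.2 <;> rw [hyo] at hy <;> simp at hy
  subst hx; subst hy; exact hab

-- core of A's running min: on any position-sorted candidate list, with i candidates
-- strictly left of idx, the result is the straddle choice cut off at distance 9999
lemma main_fold_aux (idx : Int) (cs : List (Int × String))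
    (hps : cs.Pairwise (fun a b => a.1 < b.1)) (i : Nat) (hile : i ≤ cs.length)
    (hlt' : ∀ j (hj : j < cs.length), j < i → (cs[j]).1 < idx)
    (hge' : ∀ j (hj : j < cs.length), i ≤ j → idx ≤ (cs[j]).1) :
    ((cs.foldl (minUpd idx) ((none : Option String), (9999 : Int))).1 : Option String)
      = (if cs.isEmpty then none
         else if |(straddleBest cs idx i).1 - idx| ≥ 9999 then none
         else some (straddleBest cs idx i).2) := by
  unfold straddleBest
  by_cases h0 : cs.isEmpty
  · have h00 : cs = [] := List.isEmpty_iff.mp h0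
    subst h00; rfl
  · have hne : cs ≠ [] := by intro h; rw [h] at h0; exact h0 rfl
    have hlen0 : 0 < cs.length := List.length_pos_iff.mpr hne
    rw [if_neg h0]
    have hmono : ∀ a b (ha : a < cs.length) (hb : b < cs.length), a < b → (cs[a]).1 < (cs[b]).1 :=
      fun a b ha hb hab => List.pairwise_iff_getElem.mp hps a b ha hb hab
    by_cases hi0 : 0 < i
    · -- there is a candidate at a position < idx
      have hi1 : i - 1 < cs.length := by omega
      have htlen : (cs.take i).length = i := by rw [List.length_take]; omega
      have htne : cs.take i ≠ [] := by
        intro h; rw [h] at htlen; simp at htlen; omega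
      have hp1 := hlt' (i-1) hi1 (by omega)
      have hdecp : (cs.take i).Pairwise (fun a b => |b.1 - idx| < |a.1 - idx|) := by
        rw [List.pairwise_iff_getElem]
        intro a b ha hb hab
        rw [htlen] at ha hb
        have h1 := hmono a b (by omega) (by omega) hab
        have h2 := hlt' b (by omega) (by omega)
        have h3 := hlt' a (by omega) (by omega)
        rw [List.getElem_take, List.getElem_take, abs_of_nonpos (by omega), abs_of_nonpos (by omega)]
        omega
      have hlast : (cs.take i).getLast htne = cs[i-1] := by
        simp [List.getLast_eq_getElem, htlen, List.getElem_take]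
      have hs1 : (cs.take i).foldl (minUpd idx) ((none : Option String), (9999:Int))
          = minUpd idx ((none : Option String), (9999:Int)) (cs[i-1]) := by
        rw [dec_fold idx (cs.take i) _ hdecp htne, hlast]
      have hdl : |(cs[i-1]).1 - idx| = idx - (cs[i-1]).1 := by
        rw [abs_of_nonpos (by omega)]; ring
      conv_lhs => rw [← List.take_append_drop i cs, List.foldl_append]
      rw [hs1, List.getD_eq_getElem cs ((0:Int),"") hi1, if_pos hi0]
      by_cases hilen : i < cs.length
      · -- candidates on both sides of idx
        have r0 : (if i < cs.length then some (cs.getD i ((0:Int), "")) else none) = some (cs[i]) := by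
          rw [if_pos hilen, List.getD_eq_getElem cs ((0:Int),"") hilen]
        rw [r0]
        simp only [Option.isNone_some, Option.getD_some, Bool.false_eq_true, false_or]
        have hdrop : cs.drop i = cs[i] :: cs.drop (i+1) := List.drop_eq_getElem_cons hilen
        rw [hdrop, List.foldl_cons]
        have hp2 := hge' i hilen (le_refl i)
        have hp12 := hmono (i-1) i (by omega) hilen (by omega)
        have hdr : |(cs[i]).1 - idx| = (cs[i]).1 - idx := abs_of_nonneg (by omega)
        have hnou : ∀ s0 : Option String × Int, s0.2 ≤ |(cs[i]).1 - idx| →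
            (cs.drop (i+1)).foldl (minUpd idx) s0 = s0 := by
          intro s0 hs0
          refine noupd_fold idx _ s0 ?_
          intro c hc
          obtain ⟨j, hj, hcj⟩ := List.mem_iff_getElem.mp hc
          have hjlen : i + 1 + j < cs.length := by
            rw [List.length_drop] at hj; omega
          have hce : c = cs[i+1+j] := by rw [← hcj]; exact List.getElem_drop
          rw [hce]
          have hgt := hmono i (i+1+j) hilen hjlen (by omega)
          have hgec := hge' (i+1+j) hjlen (by omega)
          rw [abs_of_nonneg (by omega)]
          rw [hdr] at hs0
          omega
        by_cases hc : idx - (cs[i-1]).1 ≤ (cs[i]).1 - idx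
        · rw [if_pos hc, Option.getD_some]
          by_cases hw : idx - (cs[i-1]).1 < 9999
          · have e1 : minUpd idx ((none : Option String), 9999) (cs[i-1])
                = (some (cs[i-1]).2, |(cs[i-1]).1 - idx|) := by
              unfold minUpd; rw [if_pos (by rw [hdl]; omega)]
            have e2 : minUpd idx (some (cs[i-1]).2, |(cs[i-1]).1 - idx|) (cs[i])
                = (some (cs[i-1]).2, |(cs[i-1]).1 - idx|) := by
              unfold minUpd; rw [if_neg (by rw [hdl, hdr]; omega)]
            rw [e1, e2, hnou _ (by rw [hdl, hdr]; omega), if_neg (by rw [hdl]; omega)]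
          · have e1 : minUpd idx ((none : Option String), 9999) (cs[i-1])
                = ((none : Option String), 9999) := by
              unfold minUpd; rw [if_neg (by rw [hdl]; omega)]
            have e2 : minUpd idx ((none : Option String), (9999:Int)) (cs[i])
                = ((none : Option String), 9999) := by
              unfold minUpd; rw [if_neg (by rw [hdr]; omega)]
            rw [e1, e2, hnou _ (by rw [hdr]; omega), if_pos (by rw [hdl]; omega)]
        · rw [if_neg hc, Option.getD_some]
          by_cases hw : (cs[i]).1 - idx < 9999
          · by_cases hw1 : idx - (cs[i-1]).1 < 9999
            · have e1 : minUpd idx ((none : Option String), 9999) (cs[i-1])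
                  = (some (cs[i-1]).2, |(cs[i-1]).1 - idx|) := by
                unfold minUpd; rw [if_pos (by rw [hdl]; omega)]
              have e2 : minUpd idx (some (cs[i-1]).2, |(cs[i-1]).1 - idx|) (cs[i])
                  = (some (cs[i]).2, |(cs[i]).1 - idx|) := by
                unfold minUpd; rw [if_pos (by rw [hdl, hdr]; omega)]
              rw [e1, e2, hnou _ (le_refl _), if_neg (by rw [hdr]; omega)]
            · have e1 : minUpd idx ((none : Option String), 9999) (cs[i-1])
                  = ((none : Option String), 9999) := by
                unfold minUpd; rw [if_neg (by rw [hdl]; omega)]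
              have e2 : minUpd idx ((none : Option String), (9999:Int)) (cs[i])
                  = (some (cs[i]).2, |(cs[i]).1 - idx|) := by
                unfold minUpd; rw [if_pos (by rw [hdr]; omega)]
              rw [e1, e2, hnou _ (le_refl _), if_neg (by rw [hdr]; omega)]
          · have e1 : minUpd idx ((none : Option String), 9999) (cs[i-1])
                = ((none : Option String), 9999) := by
              unfold minUpd; rw [if_neg (by rw [hdl]; omega)]
            have e2 : minUpd idx ((none : Option String), (9999:Int)) (cs[i])
                = ((none : Option String), 9999) := by
              unfold minUpd; rw [if_neg (by rw [hdr]; omega)]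
            rw [e1, e2, hnou _ (by rw [hdr]; omega), if_pos (by rw [hdr]; omega)]
      · -- every candidate is before idx
        have hdrop : cs.drop i = [] := List.drop_eq_nil_of_le (by omega)
        rw [hdrop, List.foldl_nil]
        have r0 : (if i < cs.length then some (cs.getD i ((0:Int), "")) else none)
            = (none : Option (Int × String)) := by rw [if_neg hilen]
        rw [r0]
        simp only [Option.isNone_none, Option.getD_some, true_or, if_pos, Option.getD_none]
        by_cases hw : idx - (cs[i-1]).1 < 9999
        · have e1 : minUpd idx ((none : Option String), 9999) (cs[i-1])
              = (some (cs[i-1]).2, |(cs[i-1]).1 - idx|) := by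
            unfold minUpd; rw [if_pos (by rw [hdl]; omega)]
          rw [e1, if_neg (by rw [hdl]; omega)]
        · have e1 : minUpd idx ((none : Option String), 9999) (cs[i-1])
              = ((none : Option String), 9999) := by
            unfold minUpd; rw [if_neg (by rw [hdl]; omega)]
          rw [e1, if_pos (by rw [hdl]; omega)]
    · -- i = 0: no candidate before idx
      have hieq : i = 0 := by omega
      subst hieq
      have hilen : 0 < cs.length := hlen0
      have hp2 := hge' 0 hilen (le_refl 0)
      have hdr : |(cs[0]).1 - idx| = (cs[0]).1 - idx := abs_of_nonneg (by omega)
      have hdrop : cs.drop 0 = cs[0] :: cs.drop 1 := List.drop_eq_getElem_cons hilen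
      conv_lhs => rw [show cs = cs.drop 0 from rfl, hdrop, List.foldl_cons]
      have hnou : ∀ s0 : Option String × Int, s0.2 ≤ |(cs[0]).1 - idx| →
          (cs.drop 1).foldl (minUpd idx) s0 = s0 := by
        intro s0 hs0
        refine noupd_fold idx _ s0 ?_
        intro c hc
        obtain ⟨j, hj, hcj⟩ := List.mem_iff_getElem.mp hc
        have hjlen : 1 + j < cs.length := by
          rw [List.length_drop] at hj; omega
        have hce : c = cs[1+j] := by rw [← hcj]; exact List.getElem_drop
        rw [hce]
        have hgt := hmono 0 (1+j) (by omega) hjlen (by omega)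
        have hgec := hge' (1+j) hjlen (by omega)
        rw [abs_of_nonneg (by omega)]
        rw [hdr] at hs0
        omega
      rw [if_neg (by omega : ¬ (0:Nat) < 0), if_pos hilen,
        List.getD_eq_getElem cs ((0:Int),"") hilen, Option.getD_some]
      by_cases hw : (cs[0]).1 - idx < 9999
      · have e2 : minUpd idx ((none : Option String), (9999:Int)) (cs[0])
            = (some (cs[0]).2, |(cs[0]).1 - idx|) := by
          unfold minUpd; rw [if_pos (by rw [hdr]; omega)]
        rw [e2, hnou _ (le_refl _), if_neg (by rw [hdr]; omega)]
      · have e2 : minUpd idx ((none : Option String), (9999:Int)) (cs[0])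
            = ((none : Option String), 9999) := by
          unfold minUpd; rw [if_neg (by rw [hdr]; omega)]
        rw [e2, hnou _ (by rw [hdr]; omega), if_pos (by rw [hdr]; omega)]

-- the alt port, phrased with the proof-side names
lemma alt_eq (words : List String) (idx : Int) :
    nearest_material_py_alt words idx
      = if (candList words).isEmpty then none
        else some ((straddleBest (candList words) idx
            (PySem.List.bisectLeft ((candList words).map (·.1)) idx)).2) := by
  rfl

-- the straddle choice is a candidate and minimizes the distance to idx
lemma straddle_min (idx : Int) (cs : List (Int × String))
    (hps : cs.Pairwise (fun a b => a.1 < b.1)) (i : Nat) (hile : i ≤ cs.length)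
    (hlt' : ∀ j (hj : j < cs.length), j < i → (cs[j]).1 < idx)
    (hge' : ∀ j (hj : j < cs.length), i ≤ j → idx ≤ (cs[j]).1)
    (hne : cs ≠ []) :
    straddleBest cs idx i ∈ cs ∧
      ∀ c ∈ cs, |(straddleBest cs idx i).1 - idx| ≤ |c.1 - idx| := by
  unfold straddleBest
  have hlen0 : 0 < cs.length := List.length_pos_iff.mpr hne
  have hmono : ∀ a b (ha : a < cs.length) (hb : b < cs.length), a ≤ b → (cs[a]).1 ≤ (cs[b]).1 := by
    intro a b ha hb hab
    rcases Nat.eq_or_lt_of_le hab with rfl | hlt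
    · exact le_refl _
    · exact le_of_lt (List.pairwise_iff_getElem.mp hps a b ha hb hlt)
  by_cases hi0 : 0 < i
  · have hi1 : i - 1 < cs.length := by omega
    rw [if_pos hi0, List.getD_eq_getElem cs _ hi1]
    by_cases hilen : i < cs.length
    · rw [if_pos hilen, List.getD_eq_getElem cs _ hilen]
      simp only [Option.isNone_some, Option.getD_some, Bool.false_eq_true, false_or]
      have hp1 := hlt' (i-1) hi1 (by omega)
      have hp2 := hge' i hilen (le_refl i)
      by_cases hc : idx - (cs[i-1]).1 ≤ (cs[i]).1 - idx
      · rw [if_pos hc, Option.getD_some]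
        refine ⟨List.getElem_mem hi1, ?_⟩
        intro c hcmem
        obtain ⟨j, hj, rfl⟩ := List.mem_iff_getElem.mp hcmem
        rw [abs_of_nonpos (by omega)]
        by_cases hji : j < i
        · have hmj := hmono j (i-1) hj hi1 (by omega)
          have hjlt := hlt' j hj hji
          rw [abs_of_nonpos (by omega)]; omega
        · have hmj := hmono i j hilen hj (by omega)
          have hjge := hge' j hj (by omega)
          rw [abs_of_nonneg (by omega)]; omega
      · rw [if_neg hc, Option.getD_some]
        refine ⟨List.getElem_mem hilen, ?_⟩
        intro c hcmem
        obtain ⟨j, hj, rfl⟩ := List.mem_iff_getElem.mp hcmem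
        rw [abs_of_nonneg (by omega)]
        by_cases hji : j < i
        · have hmj := hmono j (i-1) hj hi1 (by omega)
          have hjlt := hlt' j hj hji
          rw [abs_of_nonpos (by omega)]; omega
        · have hmj := hmono i j hilen hj (by omega)
          have hjge := hge' j hj (by omega)
          rw [abs_of_nonneg (by omega)]; omega
    · rw [if_neg hilen]
      simp only [Option.isNone_none, true_or, if_true, Option.getD_some]
      refine ⟨List.getElem_mem hi1, ?_⟩
      intro c hcmem
      obtain ⟨j, hj, rfl⟩ := List.mem_iff_getElem.mp hcmem
      have hjlt := hlt' j hj (by omega)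
      have hp1 := hlt' (i-1) hi1 (by omega)
      have hmj := hmono j (i-1) hj hi1 (by omega)
      rw [abs_of_nonpos (by omega), abs_of_nonpos (by omega)]; omega
  · have hieq : i = 0 := by omega
    subst hieq
    rw [if_neg (by omega : ¬ (0:Nat) < 0), if_pos hlen0, List.getD_eq_getElem cs _ hlen0, Option.getD_some]
    have hp2 := hge' 0 hlen0 (le_refl 0)
    refine ⟨List.getElem_mem hlen0, ?_⟩
    intro c hcmem
    obtain ⟨j, hj, rfl⟩ := List.mem_iff_getElem.mp hcmem
    have hmj := hmono 0 j hlen0 hj (by omega)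
    have hjge := hge' j hj (by omega)
    rw [abs_of_nonneg (by omega), abs_of_nonneg (by omega)]; omega

-- the bisect facts for the candidate list
lemma cand_bisect (words : List String) (idx : Int) :
    PySem.List.bisectLeft ((candList words).map (·.1)) idx ≤ (candList words).length ∧
    (∀ j (hj : j < (candList words).length),
        j < PySem.List.bisectLeft ((candList words).map (·.1)) idx → ((candList words)[j]).1 < idx) ∧
    (∀ j (hj : j < (candList words).length),
        PySem.List.bisectLeft ((candList words).map (·.1)) idx ≤ j → idx ≤ ((candList words)[j]).1) := by
  have hps := cand_pairwise words
  have hsorted : ((candList words).map (·.1)).Pairwise (· ≤ ·) :=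
    List.pairwise_map.mpr (hps.imp le_of_lt)
  obtain ⟨hile, hltm, hgem⟩ := PySem.List.bisectLeft_spec ((candList words).map (·.1)) idx hsorted
  rw [List.length_map] at hile
  refine ⟨hile, ?_, ?_⟩
  · intro j hj hji
    have h' := hltm j (by simpa using hj) hji
    simpa using h'
  · intro j hj hij
    have h' := hgem j (by simpa using hj) hij
    simpa using h'

-- a word is in the alias table iff it is one of the alias strings
lemma flat_mem (p : String × String) :
    p ∈ flatAliases ↔ ∃ kv ∈ MATERIAL_ALIASES_py, kv.1 = p.1 ∧ p.2 ∈ kv.2 := by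
  have inner : ∀ (as_ : List String) (key : String) (acc : List (String × String)) (p : String × String),
      p ∈ as_.foldl (fun acc a => acc ++ [(key, a)]) acc ↔ (p ∈ acc ∨ (key = p.1 ∧ p.2 ∈ as_)) := by
    intro as_
    induction as_ with
    | nil => intro key acc p; simp
    | cons a t ih =>
      intro key acc p
      rw [List.foldl_cons, ih]
      constructor
      · rintro (h | h)
        · rcases List.mem_append.mp h with h | h
          · exact Or.inl h
          · rcases List.mem_singleton.mp h with rfl
            exact Or.inr ⟨rfl, by simp⟩
        · exact Or.inr ⟨h.1, by simp [h.2]⟩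
      · rintro (h | ⟨hk, hm⟩)
        · exact Or.inl (List.mem_append.mpr (Or.inl h))
        · rcases List.mem_cons.mp hm with h | h
          · refine Or.inl (List.mem_append.mpr (Or.inr ?_))
            rcases p with ⟨p1, p2⟩
            simp only at hk h
            simp [← hk, ← h]
          · exact Or.inr ⟨hk, h⟩
  have outer : ∀ (al : List (String × List String)) (acc : List (String × String)) (p : String × String),
      p ∈ al.foldl (fun acc kv => kv.2.foldl (fun acc a => acc ++ [(kv.1, a)]) acc) acc ↔
        (p ∈ acc ∨ ∃ kv ∈ al, kv.1 = p.1 ∧ p.2 ∈ kv.2) := by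
    intro al
    induction al with
    | nil => intro acc p; simp
    | cons kv t ih =>
      intro acc p
      rw [List.foldl_cons, ih]
      rw [inner kv.2 kv.1 acc p]
      constructor
      · rintro ((h | h) | ⟨kv', hkv', h⟩)
        · exact Or.inl h
        · exact Or.inr ⟨kv, by simp, h.1, h.2⟩
        · exact Or.inr ⟨kv', by simp [hkv'], h⟩
      · rintro (h | ⟨kv', hkv', h⟩)
        · exact Or.inl (Or.inl h)
        · rcases List.mem_cons.mp hkv' with rfl | hmem
          · exact Or.inl (Or.inr h)
          · exact Or.inr ⟨kv', hmem, h⟩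
  unfold flatAliases
  rw [outer MATERIAL_ALIASES_py [] p]
  simp

lemma alias_isSome (w : String) : (aliasToKey.get? w).isSome = isMaterialWord w := by
  rw [← find_flat_eq_get w, Option.isSome_map, Bool.eq_iff_iff]
  unfold isMaterialWord
  rw [List.any_eq_true]
  constructor
  · intro h
    obtain ⟨ka, hmem, hp⟩ := List.find?_isSome.mp h
    have hw : w = ka.2 := eq_of_beq (by exact hp)
    obtain ⟨kv, hkv, _, hsnd⟩ := (flat_mem ka).mp hmem
    exact ⟨kv, hkv, List.contains_iff_mem.mpr (by rw [hw]; exact hsnd)⟩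
  · intro h
    obtain ⟨kv, hkv, hc⟩ := h
    refine List.find?_isSome.mpr ⟨(kv.1, w), (flat_mem (kv.1, w)).mpr
      ⟨kv, hkv, rfl, List.contains_iff_mem.mp hc⟩, by simp⟩

-- the candidate list is empty iff no word is a material alias
lemma cand_empty_iff (words : List String) :
    candList words = [] ↔
      ((PySem.List.enumerate words).any (fun jw => isMaterialWord jw.2)) = false := by
  unfold candList
  rw [List.filterMap_eq_nil_iff, List.any_eq_false]
  constructor
  · intro h jw hjw hcont
    have hm := h jw hjw
    rw [Option.map_eq_none_iff] at hm
    have hs := alias_isSome jw.2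
    rw [hm] at hs
    rw [← hs] at hcont
    exact Bool.false_ne_true (by exact hcont.symm ▸ rfl)
  · intro h jw hjw
    have hcont := h jw hjw
    have hs := alias_isSome jw.2
    cases ho : aliasToKey.get? jw.2 with
    | none => rfl
    | some k =>
      have hct : isMaterialWord jw.2 = true := by rw [← alias_isSome, ho]; rfl
      exact absurd hct hcont

-- D_'s second conjunct: every candidate is at distance ≥ 9999
lemma cands_far (words : List String) (idx : Int)
    (hall : ((PySem.List.enumerate words).all (fun jw =>
        !(isMaterialWord jw.2) || decide (9999 ≤ |jw.1 - idx|))) = true) :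
    ∀ c ∈ candList words, 9999 ≤ |c.1 - idx| := by
  intro c hc
  unfold candList at hc
  rw [List.mem_filterMap] at hc
  obtain ⟨jw, hjw, hg⟩ := hc
  cases ho : aliasToKey.get? jw.2 with
  | none => rw [ho] at hg; exact absurd hg (by simp)
  | some k =>
    rw [ho] at hg
    have hc1 : c.1 = jw.1 := by
      have : (jw.1, k) = c := by simpa using hg
      rw [← this]
    have hcont : isMaterialWord jw.2 = true := by
      rw [← alias_isSome, ho]; rfl
    have hok := List.all_eq_true.mp hall jw hjw
    rw [hcont] at hok
    simp only [Bool.not_true, Bool.false_or, decide_eq_true_eq] at hok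
    rw [hc1]
    exact hok

-- negation of D_'s second conjunct: some candidate is at distance < 9999
lemma cand_near (words : List String) (idx : Int)
    (h : ((PySem.List.enumerate words).all (fun jw =>
        !(isMaterialWord jw.2) || decide (9999 ≤ |jw.1 - idx|))) = false) :
    ∃ c ∈ candList words, |c.1 - idx| < 9999 := by
  rw [List.all_eq_false] at h
  obtain ⟨jw, hjw, hp⟩ := h
  simp only [Bool.not_eq_true, Bool.or_eq_false_iff, Bool.not_eq_false', decide_eq_false_iff_not, not_le] at hp
  have hs := alias_isSome jw.2
  rw [hp.1] at hs
  obtain ⟨k, ho⟩ := Option.isSome_iff_exists.mp hs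
  refine ⟨(jw.1, k), ?_, by simpa using hp.2⟩
  unfold candList
  exact List.mem_filterMap.mpr ⟨jw, hjw, by rw [ho]; rfl⟩

-- ===== VERDICT (by name: the statements are the Claim_ definitions above) =====
set_option maxRecDepth 8000 in
theorem nearest_material_py_spec : Claim_unchanged_nearest_material_py := by
  intro words idx _ hnD
  rw [a_eq_fold, alt_eq]
  obtain ⟨hile, hlt', hge'⟩ := cand_bisect words idx
  have key := main_fold_aux idx (candList words) (cand_pairwise words) _ hile hlt' hge'
  rw [key]
  by_cases hemp : (candList words).isEmpty
  · rw [if_pos hemp, if_pos hemp]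
  · rw [if_neg hemp, if_neg hemp]
    have hne : candList words ≠ [] := fun h => hemp (by simp [h])
    obtain ⟨_, hmin⟩ := straddle_min idx (candList words) (cand_pairwise words) _ hile hlt' hge' hne
    have hany : ((PySem.List.enumerate words).any (fun jw => isMaterialWord jw.2)) = true := by
      by_contra h
      exact hne ((cand_empty_iff words).mpr (Bool.eq_false_iff.mpr h))
    have hallf : ((PySem.List.enumerate words).all (fun jw =>
        !(isMaterialWord jw.2) || decide (9999 ≤ |jw.1 - idx|))) = false := by
      have h : ¬ ((PySem.List.enumerate words).all (fun jw =>
          !(isMaterialWord jw.2) || decide (9999 ≤ |jw.1 - idx|))) = true :=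
        fun h => hnD ⟨hany, h⟩
      simpa using h
    obtain ⟨c, hc, hcn⟩ := cand_near words idx hallf
    have hle := hmin c hc
    rw [if_neg (by omega : ¬ |(straddleBest (candList words) idx
        (PySem.List.bisectLeft ((candList words).map (·.1)) idx)).1 - idx| ≥ 9999)]

set_option maxRecDepth 100000 in
theorem nearest_material_py_changed : Claim_changed_nearest_material_py := by
  unfold Claim_changed_nearest_material_py; decide

set_option maxRecDepth 8000 in
theorem nearest_material_py_tight : Claim_exact_nearest_material_py := by
  intro words idx _ hD
  obtain ⟨hany, hall⟩ := hD
  rw [a_eq_fold, alt_eq]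
  obtain ⟨hile, hlt', hge'⟩ := cand_bisect words idx
  have key := main_fold_aux idx (candList words) (cand_pairwise words) _ hile hlt' hge'
  rw [key]
  have hne : candList words ≠ [] := by
    intro h
    rw [(cand_empty_iff words).mp h] at hany
    exact Bool.false_ne_true hany
  have hemp : (candList words).isEmpty = false := by
    cases h : (candList words).isEmpty
    · rfl
    · exact absurd (List.isEmpty_iff.mp h) hne
  rw [hemp]
  obtain ⟨hmem, _⟩ := straddle_min idx (candList words) (cand_pairwise words) _ hile hlt' hge' hne
  have hfar := cands_far words idx hall _ hmem
  simp only [Bool.false_eq_true, if_false]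
  rw [if_pos (by omega : |(straddleBest (candList words) idx
      (PySem.List.bisectLeft ((candList words).map (·.1)) idx)).1 - idx| ≥ 9999)]
  simp
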